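-- pv_equiv track=rewrite | github.com/justanindieguy/coding-problems | SortingAndSearching/ICPC_Standings/main.py | badness
-- ===== SOURCE A (Python) =====
-- def badness(teams: list[tuple[str, int]]):
--     n = len(teams)
--     cnt = [0] * (n + 1)
--
--     for team, preferred_rank in teams:
--         cnt[preferred_rank] += 1
--
--     pos, ans = 1, 0
--     for i in range(1, n + 1):
--         while cnt[i]:
--             ans += abs(pos - i)
--             cnt[i] -= 1
--             pos += 1
--
--     return ans
-- ===== SOURCE B (Python) =====
-- def badness(teams: list[tuple[str, int]]):
--     n = len(teams)
--     cnt = [0] * (n + 1)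
--     for _, r in teams:
--         cnt[r] += 1
--
--     pos, ans = 1, 0
--     for i in range(1, n + 1):
--         c = cnt[i]
--         # the c teams of rank i occupy positions pos .. pos+c-1
--         ans += _abs_range_sum(pos - i, pos + c - 1 - i)
--         pos += c
--
--     return ans
--
--
-- def _tri(x):
--     return x * (x + 1) // 2
--
--
-- def _abs_range_sum(a, b):
--     """Sum of |k| over the integers a <= k <= b (0 if the range is empty)."""
--     if b < a:
--         return 0
--     if a >= 0:
--         return _tri(b) - _tri(a - 1)
--     if b <= 0:
--         return _tri(-a) - _tri(-b - 1)
--     return _tri(-a) + _tri(b)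
-- ===== Notes on version B (the rewrite author's own statement) =====
-- stated objective: alternative
-- what changed: Keeps a counting pass but replaces A's unit-by-unit drain (the nested while that pays |pos - i| once per team, stepping pos by 1) with an O(1) closed-form arithmetic-series sum per rank bucket (triangular numbers), stepping pos by the whole bucket.
import Mathlib
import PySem

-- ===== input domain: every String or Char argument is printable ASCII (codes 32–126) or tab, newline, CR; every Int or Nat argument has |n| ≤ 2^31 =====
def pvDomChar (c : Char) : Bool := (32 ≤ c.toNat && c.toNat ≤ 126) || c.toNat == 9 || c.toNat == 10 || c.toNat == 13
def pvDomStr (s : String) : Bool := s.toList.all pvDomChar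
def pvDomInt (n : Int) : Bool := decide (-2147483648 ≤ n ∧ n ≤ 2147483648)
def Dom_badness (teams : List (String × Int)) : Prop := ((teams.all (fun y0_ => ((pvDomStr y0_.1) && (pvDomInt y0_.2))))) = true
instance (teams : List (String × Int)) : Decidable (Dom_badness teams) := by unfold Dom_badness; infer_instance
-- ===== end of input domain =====

-- B keeps a counting pass but replaces A's unit-by-unit drain loop by a closed-form
-- arithmetic-series (triangular-number) contribution per rank bucket.

-- ===== PORT A =====
-- the inner 'while cnt[i]:' loop: each iteration does ans += abs(pos - i); cnt[i] -= 1; pos += 1;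
-- it runs exactly cnt[i] times (counts are ≥ 0), so the fuel is cnt[i].toNat
def pvDrain (i : Int) (pos : Int) (ans : Int) : Nat → Int × Int
  | 0 => (pos, ans)
  | Nat.succ c => pvDrain i (pos + 1) (ans + |pos - i|) c

def badness (teams : List (String × Int)) : Int :=
  let n : Int := PySem.List.len teams
  -- cnt[preferred_rank] += 1 ; pySetD/pyGetD are Python indexing (IndexError excluded by Pre_)
  let cnt : List Int := teams.foldl
    (fun cnt t => PySem.List.pySetD cnt t.2 (PySem.List.pyGetD cnt t.2 0 + 1))
    (List.replicate (teams.length + 1) (0 : Int))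
  let r := (PySem.List.pyRange 1 (n + 1) 1).foldl
    (fun pa i => pvDrain i pa.1 pa.2 (PySem.List.pyGetD cnt i 0).toNat) ((1 : Int), (0 : Int))
  r.2

-- ===== PORT B =====
-- _tri(x) = x * (x + 1) // 2
def pvTri (x : Int) : Int := PySem.Int.floordiv (x * (x + 1)) 2

-- _abs_range_sum(a, b): sum of |k| over integers a ≤ k ≤ b (0 if empty)
def pvAbsSum (a b : Int) : Int :=
  if b < a then 0
  else if 0 ≤ a then pvTri b - pvTri (a - 1)
  else if b ≤ 0 then pvTri (-a) - pvTri (-b - 1)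
  else pvTri (-a) + pvTri b

def badness_alt (teams : List (String × Int)) : Int :=
  let n : Int := PySem.List.len teams
  let cnt : List Int := teams.foldl
    (fun cnt t => PySem.List.pySetD cnt t.2 (PySem.List.pyGetD cnt t.2 0 + 1))
    (List.replicate (teams.length + 1) (0 : Int))
  let r := (PySem.List.pyRange 1 (n + 1) 1).foldl
    (fun pa i =>
      let c := PySem.List.pyGetD cnt i 0
      (pa.1 + c, pa.2 + pvAbsSum (pa.1 - i) (pa.1 + c - 1 - i))) ((1 : Int), (0 : Int))
  r.2

-- ===== PRECONDITION & SPEC =====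
-- Pre_ is exactly where A returns: cnt[preferred_rank] needs -(len(teams)+1) ≤ rank ≤ len(teams),
-- otherwise A raises IndexError.
def Pre_badness (teams : List (String × Int)) : Prop :=
  ∀ p ∈ teams, -((teams.length : Int) + 1) ≤ p.2 ∧ p.2 ≤ (teams.length : Int)
instance (teams : List (String × Int)) : Decidable (Pre_badness teams) := by
  unfold Pre_badness; infer_instance
def pvWitness_badness : (List (String × Int)) := [("a", 2), ("b", 1)]

def Spec_badness (teams : List (String × Int)) (out : Int) : Prop := out = badness_alt teams
instance (teams : List (String × Int)) (out : Int) : Decidable (Spec_badness teams out) := by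
  unfold Spec_badness; infer_instance

-- ===== CLAIM (what is proved, stated in full; the proofs are below) =====
def Claim_equal_badness : Prop := ∀ (teams : List (String × Int)), Dom_badness teams → Pre_badness teams → Spec_badness teams (badness teams)

-- ===== LEMMAS AND PROOFS =====

-- x*(x+1) is even, so pvTri is the exact half
theorem pvTwoTri (x : Int) : 2 * pvTri x = x * (x + 1) := by
  obtain ⟨t, ht⟩ := Int.even_mul_succ_self x
  unfold pvTri
  rw [PySem.Int.floordiv_eq_ediv_of_pos (by norm_num), ht]
  rw [show t + t = 2 * t from by ring, Int.mul_ediv_cancel_left t (by norm_num)]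

theorem pvTriStep (x : Int) : pvTri x = pvTri (x - 1) + x := by
  have h1 := pvTwoTri x
  have h2 := pvTwoTri (x - 1)
  have h3 : x * (x + 1) = (x - 1) * ((x - 1) + 1) + 2 * x := by ring
  linarith

theorem pvTri_zero : pvTri 0 = 0 := by decide
theorem pvTri_one : pvTri 1 = 1 := by decide
theorem pvTri_negone : pvTri (-1) = 0 := by decide

-- peeling the smallest summand off the closed form
theorem pvAbsSum_peel (a b : Int) (h : a ≤ b) : pvAbsSum a b = |a| + pvAbsSum (a + 1) b := by
  unfold pvAbsSum
  rw [if_neg (by omega)]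
  by_cases ha : 0 ≤ a
  · rw [if_pos ha, abs_of_nonneg ha]
    by_cases hba : b < a + 1
    · rw [if_pos hba]
      have hb : b = a := by omega
      rw [hb]
      have := pvTriStep a
      linarith
    · rw [if_neg hba, if_pos (by omega)]
      rw [show a + 1 - 1 = a from by ring]
      have := pvTriStep a
      linarith
  · rw [if_neg ha, abs_of_neg (by omega)]
    by_cases hb : b ≤ 0
    · rw [if_pos hb]
      by_cases hba : b < a + 1
      · rw [if_pos hba]
        have hba' : b = a := by omega
        rw [hba']
        have := pvTriStep (-a)
        linarith
      · rw [if_neg hba]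
        by_cases ha1 : 0 ≤ a + 1
        · have haa : a = -1 := by omega
          have hbb : b = 0 := by omega
          rw [haa, hbb]
          rw [if_pos (by norm_num)]
          norm_num [pvTri_zero, pvTri_one, pvTri_negone]
        · rw [if_neg ha1, if_pos (by omega)]
          rw [show -(a + 1) = -a - 1 from by ring]
          have := pvTriStep (-a)
          linarith
    · rw [if_neg hb]
      by_cases ha1 : 0 ≤ a + 1
      · have haa : a = -1 := by omega
        subst haa
        rw [if_neg (by omega), if_pos (by norm_num)]
        norm_num
        linarith [pvTri_one, pvTri_negone]
      · rw [if_neg (by omega), if_neg ha1, if_neg (by omega)]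
        rw [show -(a + 1) = -a - 1 from by ring]
        have := pvTriStep (-a)
        linarith

-- A's while-loop equals B's closed form
theorem pvDrain_closed (c : Nat) : ∀ (i pos ans : Int),
    pvDrain i pos ans c = (pos + (c : Int), ans + pvAbsSum (pos - i) (pos + (c : Int) - 1 - i)) := by
  induction c with
  | zero =>
      intro i pos ans
      simp only [pvDrain, Nat.cast_zero, add_zero]
      rw [pvAbsSum, if_pos (by omega)]
      simp
  | succ c ih =>
      intro i pos ans
      rw [pvDrain, ih]
      have hle : pos - i ≤ pos + ((c : Int) + 1) - 1 - i := by omega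
      push_cast
      rw [pvAbsSum_peel _ _ hle]
      simp only [Prod.mk.injEq]
      refine ⟨by omega, ?_⟩
      rw [show pos - i + 1 = pos + 1 - i from by ring,
        show pos + ((c : Int) + 1) - 1 - i = pos + 1 + (c : Int) - 1 - i from by ring]
      ring

-- the bump step of A's (and B's) counting pass
def pvBump (c : List Int) (r : Int) : List Int :=
  PySem.List.pySetD c r (PySem.List.pyGetD c r 0 + 1)

theorem pvModWrap (r m : Int) (h0 : -m ≤ r) (h1 : r < 0) : r % m = r + m := by
  have h2 : (r + m * 1) % m = r % m := Int.add_mul_emod_self_left r m 1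
  rw [← h2]
  simp only [mul_one]
  exact Int.emod_eq_of_lt (by omega) (by omega)

-- Python's in-range indexing, negative wrap included, is indexing at r % len
theorem pySetD_wrap (c : List Int) (r : Int) (h0 : -(c.length : Int) ≤ r)
    (h1 : r < (c.length : Int)) (v : Int) :
    PySem.List.pySetD c r v = c.set (PySem.Int.mod r c.length).toNat v := by
  have hm : (0 : Int) < (c.length : Int) := by omega
  rw [PySem.Int.mod_eq_emod_of_pos hm]
  simp only [PySem.List.pySetD, PySem.List.pySet?, PySem.List.pyIdx?]
  by_cases h : 0 ≤ r
  · rw [if_pos h, if_pos h1]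
    simp [Int.emod_eq_of_lt h h1]
  · rw [if_neg h, if_pos h0]
    simp only [Option.map_some, Option.getD_some]
    congr 1
    have := pvModWrap r c.length h0 (by omega)
    omega

theorem pyGetD_wrap (c : List Int) (r : Int) (h0 : -(c.length : Int) ≤ r)
    (h1 : r < (c.length : Int)) (d : Int) :
    PySem.List.pyGetD c r d = c.getD (PySem.Int.mod r c.length).toNat d := by
  have hm : (0 : Int) < (c.length : Int) := by omega
  rw [PySem.Int.mod_eq_emod_of_pos hm]
  simp only [PySem.List.pyGetD, PySem.List.pyGet?, PySem.List.pyIdx?]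
  by_cases h : 0 ≤ r
  · rw [if_pos h, if_pos h1]
    simp [Int.emod_eq_of_lt h h1, List.getD]
  · rw [if_neg h, if_pos h0]
    have := pvModWrap r c.length h0 (by omega)
    have he : (r % (c.length : Int)).toNat = c.length - (-r).toNat := by omega
    simp [List.getD, he]

theorem pvBump_getD (c : List Int) (r : Int) (h0 : -(c.length : Int) ≤ r)
    (h1 : r < (c.length : Int)) (j : Nat) :
    (pvBump c r).getD j 0
      = c.getD j 0 + if (j : Int) = PySem.Int.mod r c.length then 1 else 0 := by
  have hm : (0 : Int) < (c.length : Int) := by omega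
  have hm0 := PySem.Int.mod_nonneg r hm
  have hmlt := PySem.Int.mod_lt r hm
  rw [pvBump, pySetD_wrap c r h0 h1, pyGetD_wrap c r h0 h1]
  simp only [List.getD, List.getElem?_set]
  split_ifs with ha hb hc <;> simp_all <;> omega

theorem pvBump_length (c : List Int) (r : Int) : (pvBump c r).length = c.length := by
  unfold pvBump
  exact PySem.List.length_pySetD c r _

-- counting pass invariant: after folding pvBump over L (all entries in-range indices of c),
-- slot j holds its old value plus the number of entries whose slot (r % len) is j
theorem pvCount_inv (L : List Int) (c : List Int)
    (h : ∀ r ∈ L, -(c.length : Int) ≤ r ∧ r < (c.length : Int)) (j : Nat) :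
    (L.foldl pvBump c).getD j 0
      = c.getD j 0 + ((L.map (fun r => PySem.Int.mod r c.length)).count (j : Int) : Int) := by
  induction L generalizing c with
  | nil => simp
  | cons r L ih =>
      have hr := h r (by simp)
      have hlen : ∀ x ∈ L, -(((pvBump c r).length : Int)) ≤ x ∧ x < ((pvBump c r).length : Int) := by
        intro x hx; rw [pvBump_length]; exact h x (by simp [hx])
      simp only [List.foldl_cons]
      rw [ih (pvBump c r) hlen, pvBump_getD c r hr.1 hr.2]
      rw [pvBump_length]
      simp only [List.map_cons, List.count_cons]
      push_cast
      split_ifs with hA hB hB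
      · ring
      · simp_all
      · simp_all
      · ring

theorem pvFoldl_length (L : List Int) (c : List Int) :
    (L.foldl pvBump c).length = c.length := by
  induction L generalizing c with
  | nil => rfl
  | cons r L ih => simp only [List.foldl_cons]; rw [ih, pvBump_length]

-- the whole equivalence, stated over the list of preferred ranks
theorem pvMain (ranks : List Int) (n : Nat)
    (hmem : ∀ r ∈ ranks, -((n : Int) + 1) ≤ r ∧ r ≤ (n : Int)) :
    ((PySem.List.pyRange 1 ((n : Int) + 1) 1).foldl
        (fun pa i => pvDrain i pa.1 pa.2
          (PySem.List.pyGetD (ranks.foldl pvBump (List.replicate (n + 1) (0 : Int))) i 0).toNat)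
        ((1 : Int), (0 : Int))).2
      = ((PySem.List.pyRange 1 ((n : Int) + 1) 1).foldl
          (fun pa i =>
            let c := PySem.List.pyGetD (ranks.foldl pvBump (List.replicate (n + 1) (0 : Int))) i 0
            (pa.1 + c, pa.2 + pvAbsSum (pa.1 - i) (pa.1 + c - 1 - i)))
          ((1 : Int), (0 : Int))).2 := by
  have hcast : ((List.replicate (n + 1) (0 : Int)).length : Int) = (n : Int) + 1 := by simp
  have hclen : (ranks.foldl pvBump (List.replicate (n + 1) (0 : Int))).length = n + 1 := by
    rw [pvFoldl_length, List.length_replicate]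
  have hcval : ∀ i : Int, 1 ≤ i → i ≤ (n : Int) →
      PySem.List.pyGetD (ranks.foldl pvBump (List.replicate (n + 1) (0 : Int))) i 0
        = (((ranks.map (fun r => PySem.Int.mod r ((n : Int) + 1))).count i : Nat) : Int) := by
    intro i h1 h2
    have h0 : (0 : Int) ≤ i := by omega
    have hlt : i < ((ranks.foldl pvBump (List.replicate (n + 1) (0 : Int))).length : Int) := by
      rw [hclen]; push_cast; omega
    rw [PySem.List.pyGetD_eq_getElem _ 0 h0 hlt]
    have hjlt : i.toNat < (ranks.foldl pvBump (List.replicate (n + 1) (0 : Int))).length := by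
      omega
    have hgd : (ranks.foldl pvBump (List.replicate (n + 1) (0 : Int)))[i.toNat]
        = (ranks.foldl pvBump (List.replicate (n + 1) (0 : Int))).getD i.toNat 0 := by
      simp [List.getD, List.getElem?_eq_getElem hjlt]
    rw [hgd, pvCount_inv]
    · rw [show ((i.toNat : Int)) = i from Int.toNat_of_nonneg h0, hcast]
      simp [List.getD, show i.toNat < n + 1 from by omega]
    · intro r hr
      have := hmem r hr
      rw [hcast]
      omega
  congr 1
  apply PySem.List.foldl_congr_mem
  intro pa i hi
  have hib := PySem.List.mem_pyRange_one.mp hi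
  rw [hcval i hib.1 (by omega), Int.toNat_natCast, pvDrain_closed]

-- ===== VERDICT (by name: the statement is the Claim_ definition above) =====
theorem badness_spec : Claim_equal_badness := by
  intro teams _ hpre
  unfold Spec_badness badness badness_alt
  simp only [PySem.List.len_eq]
  have hfold : teams.foldl
      (fun cnt t => PySem.List.pySetD cnt t.2 (PySem.List.pyGetD cnt t.2 0 + 1))
      (List.replicate (teams.length + 1) (0 : Int))
      = (teams.map (fun t => t.2)).foldl pvBump (List.replicate (teams.length + 1) (0 : Int)) := by
    rw [List.foldl_map]
    rfl
  rw [hfold]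
  apply pvMain (teams.map (fun t => t.2)) teams.length
  intro r hr
  obtain ⟨p, hp, hpr⟩ := List.mem_map.mp hr
  have := hpre p hp
  constructor <;> omega
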